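-- pv_equiv track=rewrite | github.com/henrychooi/psa-codesprint-tribyte | backend/career_roadmap.py | _sanitize_domain_label
-- ===== SOURCE A (Python) =====
-- from typing import Dict, List, Any, Tuple, Optional, Set
--
-- def _sanitize_domain_label(value: Optional[str]) -> str:
--     """Normalize raw labels (department, function areas) for comparison."""
--     if not value:
--         return ''
--     label = value.strip()
--     if ':' in label:
--         label = label.split(':', 1)[0]
--     label = label.lower()
--     label = label.replace('/', ' ')
--     label = label.replace('&', ' and ')
--     label = label.replace('-', ' ')
--     label = ''.join(ch for ch in label if ch.isalnum() or ch.isspace())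
--     return ' '.join(label.split())
-- ===== SOURCE B (Python) =====
-- def _sanitize_domain_label(value):
--     """Normalize raw labels (department, function areas) for comparison."""
--     if not value:
--         return ''
--     label = value.strip()
--     if ':' in label:
--         label = label.split(':', 1)[0]
--     # Single-pass tokenizer: build the final word list directly with a
--     # current-word accumulator; no intermediate normalized string, no split().
--     words = []
--     cur = []
--     for ch in label:
--         c = ch.lower()
--         if c == '&':
--             if cur:
--                 words.append(''.join(cur))
--                 cur = []
--             words.append('and')
--         elif c == '/' or c == '-' or c.isspace():
--             if cur:
--                 words.append(''.join(cur))
--                 cur = []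
--         elif c.isalnum():
--             cur.append(c)
--     if cur:
--         words.append(''.join(cur))
--     return ' '.join(words)
-- ===== Notes on version B (the rewrite author's own statement) =====
-- stated objective: alternative
-- what changed: A normalizes via a pipeline that rewrites the whole string (lower, three str.replace passes, a filtering comprehension) and then re-splits it with split()/join; B never materializes a normalized string: it is a single-pass tokenizer with a current-word accumulator that builds the final word list directly (flushing on '/', '-', '&' and whitespace, emitting 'and' for '&', keeping alphanumerics) and joins once.
import Mathlib
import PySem

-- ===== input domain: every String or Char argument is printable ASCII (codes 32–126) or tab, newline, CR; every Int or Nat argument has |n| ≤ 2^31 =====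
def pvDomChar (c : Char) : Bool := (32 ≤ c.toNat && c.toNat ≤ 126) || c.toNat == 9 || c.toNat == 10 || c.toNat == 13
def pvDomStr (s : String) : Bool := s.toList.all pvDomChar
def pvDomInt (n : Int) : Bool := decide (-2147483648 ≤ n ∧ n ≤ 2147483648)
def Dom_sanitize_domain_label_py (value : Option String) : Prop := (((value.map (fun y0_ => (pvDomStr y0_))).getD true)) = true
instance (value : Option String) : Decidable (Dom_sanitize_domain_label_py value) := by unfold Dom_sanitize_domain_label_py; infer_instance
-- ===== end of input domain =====

-- B replaces A's replace/filter/split/join pipeline by a single-pass tokenizer that builds the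
-- word list directly (current-word accumulator, flush on separators); alternative decomposition.

-- ===== PORT A =====
-- literal transliteration of A: strip, truncate at ':', lower, three replaces, filter, split/join
def sanitize_domain_label_py (value : Option String) : String :=
  match value with
  | none => ""
  | some v =>
    if v = "" then ""
    else
      let label := PySem.Chars.strip v.toList
      let label := if PySem.Chars.isIn [':'] label then
          (PySem.Chars.splitOnMax label [':'] 1).headD [] else label
      let label := PySem.Chars.lower label
      let label := PySem.Chars.replace label ['/'] [' ']
      let label := PySem.Chars.replace label ['&'] [' ', 'a', 'n', 'd', ' ']
      let label := PySem.Chars.replace label ['-'] [' ']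
      let label := label.filter (fun ch => PySem.Chars.isalnum ch || PySem.Chars.isspace ch)
      String.ofList (PySem.Chars.join [' '] (PySem.Chars.split₀ label))

-- ===== PORT B =====
-- B's loop: state = (cur : current word, reversed) × (acc : completed words, reversed list);
-- flush closes the current word, '&' also emits the word "and", alnum chars extend the word.
def pvFlush (cur : List Char) (acc : List (List Char)) : List (List Char) :=
  if cur.isEmpty then acc else cur.reverse :: acc

def pvLoop : List Char → List Char → List (List Char) → List (List Char)
  | [], cur, acc => if cur.isEmpty then acc.reverse else (cur.reverse :: acc).reverse
  | ch :: rest, cur, acc =>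
    let c := PySem.Chars.lowerChar ch
    if c = '&' then pvLoop rest [] (['a', 'n', 'd'] :: pvFlush cur acc)
    else if c = '/' || c = '-' || PySem.Chars.isspace c then pvLoop rest [] (pvFlush cur acc)
    else if PySem.Chars.isalnum c then pvLoop rest (c :: cur) acc
    else pvLoop rest cur acc

def sanitize_domain_label_py_alt (value : Option String) : String :=
  match value with
  | none => ""
  | some v =>
    if v = "" then ""
    else
      let label := PySem.Chars.strip v.toList
      let label := if PySem.Chars.isIn [':'] label then
          (PySem.Chars.splitOnMax label [':'] 1).headD [] else label
      String.ofList (PySem.Chars.join [' '] (pvLoop label [] []))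

-- ===== PRECONDITION & SPEC =====
def Spec_sanitize_domain_label_py (value : Option String) (out : String) : Prop := out = sanitize_domain_label_py_alt value
instance (value : Option String) (out : String) : Decidable (Spec_sanitize_domain_label_py value out) := by unfold Spec_sanitize_domain_label_py; infer_instance

-- ===== CLAIM (what is proved, stated in full; the proofs are below) =====
def Claim_equal_sanitize_domain_label_py : Prop := ∀ (value : Option String), Dom_sanitize_domain_label_py value → Spec_sanitize_domain_label_py value (sanitize_domain_label_py value)

-- ===== LEMMAS AND PROOFS =====

-- the piece A's lower+replaces+filter pipeline contributes for one character of the label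
def pvEmit (ch : Char) : List Char :=
  let c := PySem.Chars.lowerChar ch
  if c = '/' || c = '-' then [' ']
  else if c = '&' then [' ', 'a', 'n', 'd', ' ']
  else if PySem.Chars.isalnum c || PySem.Chars.isspace c then [c]
  else []

-- single-character replace is a flatMap
theorem replace_go_single (o : Char) (new : List Char) :
    ∀ (fuel : Nat) (l acc : List Char), l.length ≤ fuel →
      PySem.Chars.replace.go [o] new fuel l acc
        = acc.reverse ++ l.flatMap (fun c => if c = o then new else [c]) := by
  intro fuel
  induction fuel with
  | zero =>
    intro l acc h
    have : l = [] := List.eq_nil_of_length_eq_zero (Nat.le_zero.mp h)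
    subst this
    simp [PySem.Chars.replace.go]
  | succ n ih =>
    intro l acc h
    cases l with
    | nil => simp [PySem.Chars.replace.go]
    | cons c t =>
      by_cases hc : c = o
      · subst hc
        have hpre : List.isPrefixOf [c] (c :: t) = true := by
          simp [List.isPrefixOf]
        rw [PySem.Chars.replace.go]
        simp only [hpre, if_pos]
        rw [show List.drop [c].length (c :: t) = t from rfl]
        rw [ih t (new.reverse ++ acc) (by simpa using Nat.lt_succ_iff.mp (by simpa using h))]
        simp
      · have hpre' : List.isPrefixOf [o] (c :: t) = false := by
          simp [List.isPrefixOf]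
          exact fun h' => (hc h'.symm).elim
        rw [PySem.Chars.replace.go]
        simp only [hpre', Bool.false_eq_true, if_false]
        rw [ih t (c :: acc) (by simpa using Nat.lt_succ_iff.mp (by simpa using h))]
        simp [hc]

theorem replace_single (s : List Char) (o : Char) (new : List Char) :
    PySem.Chars.replace s [o] new = s.flatMap (fun c => if c = o then new else [c]) := by
  unfold PySem.Chars.replace
  simp [replace_go_single o new s.length s [] (le_refl _)]

-- the per-character behaviour of lower + three replaces + filter
theorem perChar_eq (c : Char) :
    List.filter (fun ch => PySem.Chars.isalnum ch || PySem.Chars.isspace ch)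
      (List.flatMap
        (fun x => List.flatMap (fun d => if d = '-' then [' '] else [d])
          (if x = '&' then [' ', 'a', 'n', 'd', ' '] else [x]))
        (if PySem.Chars.lowerChar c = '/' then [' '] else [PySem.Chars.lowerChar c]))
      = pvEmit c := by
  unfold pvEmit
  set d := PySem.Chars.lowerChar c with hd
  by_cases h1 : d = '/'
  · simp only [h1]; decide
  · by_cases h2 : d = '&'
    · simp only [h2, if_pos]; decide
    · by_cases h3 : d = '-'
      · simp only [h3]; decide
      · simp only [h1, h2, h3, if_false, List.flatMap_cons,
          List.flatMap_nil, List.append_nil]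
        cases hb : (PySem.Chars.isalnum d || PySem.Chars.isspace d) <;>
          simp [hb]

-- A's whole character pipeline is the flatMap of pvEmit
theorem chain_eq (cs : List Char) :
    ((PySem.Chars.replace
        (PySem.Chars.replace
          (PySem.Chars.replace (PySem.Chars.lower cs) ['/'] [' '])
          ['&'] [' ', 'a', 'n', 'd', ' '])
        ['-'] [' ']).filter (fun ch => PySem.Chars.isalnum ch || PySem.Chars.isspace ch))
      = cs.flatMap pvEmit := by
  rw [replace_single, replace_single, replace_single]
  unfold PySem.Chars.lower
  rw [List.flatMap_map, List.flatMap_assoc, List.flatMap_assoc]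
  rw [List.filter_flatMap]
  apply List.flatMap_congr
  intro c _
  exact perChar_eq c

-- split() of A's pipeline output is exactly B's tokenizer loop, at every loop state
-- a whitespace character is never alphanumeric
theorem isalnum_of_isspace (d : Char) (hsp : PySem.Chars.isspace d = true) :
    PySem.Chars.isalnum d = false := by
  cases hv : PySem.Chars.isalnum d
  · rfl
  · exfalso
    revert hv hsp
    simp [PySem.Chars.isspace, PySem.Chars.isalnum, PySem.Chars.isdigit,
      PySem.Chars.isalpha, PySem.Chars.isupper, PySem.Chars.islower,
      Char.le_def, UInt32.le_iff_toNat_le]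
    omega

theorem go_eq_pvLoop (cs : List Char) : ∀ (cur : List Char) (acc : List (List Char)),
    PySem.Chars.split₀.go (cs.flatMap pvEmit) cur acc = pvLoop cs cur acc := by
  induction cs with
  | nil => intro cur acc; simp [pvLoop, PySem.Chars.split₀.go]
  | cons c rest ih =>
    intro cur acc
    rw [List.flatMap_cons, pvLoop]
    by_cases h1 : PySem.Chars.lowerChar c = '/'
    · simp only [pvEmit, h1]
      cases hcur : cur.isEmpty <;>
        simp [PySem.Chars.split₀.go, PySem.Chars.isspace, pvFlush, hcur, ih]
    · by_cases h2 : PySem.Chars.lowerChar c = '&'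
      · simp only [pvEmit, h2]
        cases hcur : cur.isEmpty <;>
          simp [PySem.Chars.split₀.go, PySem.Chars.isspace, pvFlush, hcur, ih]
      · by_cases h3 : PySem.Chars.lowerChar c = '-'
        · simp only [pvEmit, h3]
          cases hcur : cur.isEmpty <;>
            simp [PySem.Chars.split₀.go, PySem.Chars.isspace, pvFlush, hcur, ih]
        · simp only [pvEmit, h1, h2, h3, decide_false, Bool.or_self, Bool.false_or,
            if_false]
          by_cases hsp : PySem.Chars.isspace (PySem.Chars.lowerChar c) = true
          · have hal : PySem.Chars.isalnum (PySem.Chars.lowerChar c) = false :=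
              isalnum_of_isspace _ hsp
            simp only [hsp, hal, Bool.or_true, if_true, Bool.false_eq_true, if_false]
            cases hcur : cur.isEmpty <;>
              simp [PySem.Chars.split₀.go, hsp, pvFlush, hcur, ih]
          · simp only [Bool.not_eq_true] at hsp
            simp only [hsp, Bool.or_false]
            cases hal : PySem.Chars.isalnum (PySem.Chars.lowerChar c)
            · simp [ih]
            · simp [PySem.Chars.split₀.go, hsp, ih]

-- ===== VERDICT (by name: the statement is the Claim_ definition above) =====
theorem sanitize_domain_label_py_spec : Claim_equal_sanitize_domain_label_py := by
  intro value _
  unfold Spec_sanitize_domain_label_py sanitize_domain_label_py sanitize_domain_label_py_alt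
  cases value with
  | none => rfl
  | some v =>
    by_cases hv : v = ""
    · simp [hv]
    · simp only [hv, if_false]
      rw [chain_eq]
      unfold PySem.Chars.split₀
      rw [go_eq_pvLoop]
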